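-- pv_equiv track=rewrite | github.com/cosmicshuai/LeetCode_Practice | DP/2431. Maximize Total Tastiness of Purchased Fruits.py | maxTastiness
-- ===== SOURCE A (Python) =====
-- from typing import List
--
-- def maxTastiness(price: List[int], tastiness: List[int], maxAmount: int, maxCoupons: int) -> int:
--     n = len(price)
--     candis = []
--     for i in range(n):
--         candis.append((tastiness[i], -price[i]))
--
--     candis.sort(reverse = True)
--     dp = [[[-1] * (maxCoupons + 1) for _ in range(maxAmount + 1)] for _ in range(n)]
--     def dfs(idx, amount, coupons):
--         if amount < 0 or idx == n:
--             return 0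
--         if dp[idx][amount][coupons] != -1:
--             return dp[idx][amount][coupons]
--
--         t = candis[idx][0]
--         p = -candis[idx][1]
--         take_with_coupon = 0
--         if coupons > 0 and amount >= p // 2:
--             take_with_coupon = t + dfs(idx + 1, amount - p//2, coupons - 1)
--
--         take_without_coupon = 0
--         if amount >= p:
--             take_without_coupon = t + dfs(idx + 1, amount - p, coupons)
--
--         no_take = dfs(idx + 1, amount, coupons)
--
--         dp[idx][amount][coupons] = max(take_with_coupon, take_without_coupon, no_take)
--         return dp[idx][amount][coupons]
--
--     return dfs(0, maxAmount, maxCoupons)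
-- ===== SOURCE B (Python) =====
-- def maxTastiness(price, tastiness, maxAmount, maxCoupons):
--     # Bottom-up layered knapsack over (budget, coupons-left); no sorting, no recursion.
--     if maxAmount < 0:
--         return 0
--     dp = [[0] * (maxCoupons + 1) for _ in range(maxAmount + 1)]
--     for p, t in zip(price, tastiness):
--         half = p // 2
--         dp = [[max(dp[a][c],
--                    dp[a - p][c] + t if a >= p else dp[a][c],
--                    dp[a - half][c - 1] + t if c >= 1 and a >= half else dp[a][c])
--                for c in range(maxCoupons + 1)]
--               for a in range(maxAmount + 1)]
--     return dp[maxAmount][maxCoupons]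
-- ===== Notes on version B (the rewrite author's own statement) =====
-- stated objective: alternative
-- what changed: Replaces A's sort + top-down memoized DFS over a preallocated 3D memo table by an iterative bottom-up layered DP over the (budget, coupons-left) grid, processing items in input order (no sorting, no recursion, no memo table).
-- outside the precondition, e.g. on maxTastiness([-2], [5], 0, 1): A returns 5, B raises IndexError; on maxTastiness([], [], 0, -1): A returns 0, B raises IndexError
import Mathlib
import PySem

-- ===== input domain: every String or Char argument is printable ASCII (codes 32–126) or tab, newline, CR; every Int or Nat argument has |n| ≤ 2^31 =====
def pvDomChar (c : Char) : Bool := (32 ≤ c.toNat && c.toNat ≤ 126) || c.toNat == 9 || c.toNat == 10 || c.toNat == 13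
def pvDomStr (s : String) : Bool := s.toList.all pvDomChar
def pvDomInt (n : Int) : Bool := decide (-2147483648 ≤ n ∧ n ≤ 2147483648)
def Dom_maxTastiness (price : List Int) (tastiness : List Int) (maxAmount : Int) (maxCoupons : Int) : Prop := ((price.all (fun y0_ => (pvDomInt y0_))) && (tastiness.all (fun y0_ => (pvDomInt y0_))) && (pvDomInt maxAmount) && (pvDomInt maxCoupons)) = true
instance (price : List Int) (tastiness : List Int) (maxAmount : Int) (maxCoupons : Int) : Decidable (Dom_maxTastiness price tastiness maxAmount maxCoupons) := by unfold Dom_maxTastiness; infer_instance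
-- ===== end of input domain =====

-- B replaces A's sort + top-down memoized DFS (3D memo table) by a bottom-up layered DP
-- over the (budget, coupons-left) grid in input order; alternative decomposition, same cost.


-- ===== PORT A =====
-- dfs(idx, amount, coupons) with the memo threaded through; the -1-initialized 3D memo list
-- is ported as a Dict keyed by (idx, amount, coupons) read with default -1 (exact under
-- Pre_maxTastiness, where every memo access Python performs is in range and non-negative).
-- 'idx == n' is carried as 'the suffix of candis from idx is []' (the suffix is threaded with idx).
def pvDfsA : List (Int × Int) → Int → Int → Int → PySem.Dict (Int × Int × Int) Int →
    Int × PySem.Dict (Int × Int × Int) Int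
  | [], _, _, _, dp => (0, dp)                         -- idx == n (also subsumes amount < 0 there)
  | (t, negp) :: rest', idx, amount, coupons, dp =>
    if amount < 0 then (0, dp)
    else
      let cached := dp.getD (idx, amount, coupons) (-1)
      if cached ≠ -1 then (cached, dp)
      else
        let p := -negp
        let r1 :=
          if 0 < coupons ∧ PySem.Int.floordiv p 2 ≤ amount then
            let s := pvDfsA rest' (idx + 1) (amount - PySem.Int.floordiv p 2) (coupons - 1) dp
            (t + s.1, s.2)
          else (0, dp)
        let r2 :=
          if p ≤ amount then
            let s := pvDfsA rest' (idx + 1) (amount - p) coupons r1.2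
            (t + s.1, s.2)
          else (0, r1.2)
        let s3 := pvDfsA rest' (idx + 1) amount coupons r2.2
        let v := max r1.1 (max r2.1 s3.1)
        (v, s3.2.insert (idx, amount, coupons) v)

def maxTastiness (price : List Int) (tastiness : List Int) (maxAmount : Int) (maxCoupons : Int) : Int :=
  let n : Int := price.length
  let candis := (PySem.List.pyRange 0 n 1).map (fun i =>
    (PySem.List.pyGetD tastiness i 0, -(PySem.List.pyGetD price i 0)))   -- tastiness[i], -price[i]; in range under Pre_
  let candis := PySem.List.sorted2 candis (fun x => x.1) (fun x => x.2) true   -- candis.sort(reverse=True)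
  (pvDfsA candis 0 maxAmount maxCoupons PySem.Dict.empty).1

-- ===== PORT B =====
-- dp[a][c] (in range at every read B performs under Pre_maxTastiness)
def pvCell (dp : List (List Int)) (a c : Int) : Int :=
  PySem.List.pyGetD (PySem.List.pyGetD dp a []) c 0

-- one item: the comprehension rebuilding the whole grid
def pvStepB (maxAmount maxCoupons : Int) (dp : List (List Int)) (pt : Int × Int) : List (List Int) :=
  let p := pt.1
  let t := pt.2
  let half := PySem.Int.floordiv p 2
  (PySem.List.pyRange 0 (maxAmount + 1) 1).map (fun a =>
    (PySem.List.pyRange 0 (maxCoupons + 1) 1).map (fun c =>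
      max (pvCell dp a c)
        (max (if p ≤ a then pvCell dp (a - p) c + t else pvCell dp a c)
             (if 1 ≤ c ∧ half ≤ a then pvCell dp (a - half) (c - 1) + t else pvCell dp a c))))

def maxTastiness_alt (price : List Int) (tastiness : List Int) (maxAmount : Int) (maxCoupons : Int) : Int :=
  if maxAmount < 0 then 0
  else
    let dp0 := (PySem.List.pyRange 0 (maxAmount + 1) 1).map (fun _ =>
      (PySem.List.pyRange 0 (maxCoupons + 1) 1).map (fun _ => (0 : Int)))
    let dp := (price.zip tastiness).foldl (pvStepB maxAmount maxCoupons) dp0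
    pvCell dp maxAmount maxCoupons

-- ===== PRECONDITION & SPEC =====
-- Pre_ excludes: tastiness shorter than price (A raises IndexError building candis); and, when
-- maxAmount ≥ 0, negative prices and negative maxCoupons — outside the problem's natural domain,
-- where A indexes its memo out of range and raises IndexError on all but a few accidental inputs.
def Pre_maxTastiness (price : List Int) (tastiness : List Int) (maxAmount : Int) (maxCoupons : Int) : Prop :=
  price.length ≤ tastiness.length ∧
    (maxAmount < 0 ∨ ((∀ p ∈ price, 0 ≤ p) ∧ 0 ≤ maxCoupons))
instance (price : List Int) (tastiness : List Int) (maxAmount : Int) (maxCoupons : Int) : Decidable (Pre_maxTastiness price tastiness maxAmount maxCoupons) := by unfold Pre_maxTastiness; infer_instance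

def pvWitness_maxTastiness : List Int × List Int × Int × Int := ([3, 1, 4], [5, 2, 7], 6, 1)

def Spec_maxTastiness (price : List Int) (tastiness : List Int) (maxAmount : Int) (maxCoupons : Int) (out : Int) : Prop := out = maxTastiness_alt price tastiness maxAmount maxCoupons
instance (price : List Int) (tastiness : List Int) (maxAmount : Int) (maxCoupons : Int) (out : Int) : Decidable (Spec_maxTastiness price tastiness maxAmount maxCoupons out) := by unfold Spec_maxTastiness; infer_instance

-- ===== CLAIM (what is proved, stated in full; the proofs are below) =====
def Claim_equal_maxTastiness : Prop := ∀ (price : List Int) (tastiness : List Int) (maxAmount : Int) (maxCoupons : Int), Dom_maxTastiness price tastiness maxAmount maxCoupons → Pre_maxTastiness price tastiness maxAmount maxCoupons → Spec_maxTastiness price tastiness maxAmount maxCoupons (maxTastiness price tastiness maxAmount maxCoupons)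

-- ===== LEMMAS AND PROOFS =====

-- the common functional spec: best tastiness from the items of l (pairs (price, tastiness)),
-- deciding the head first, with budget a and c coupons — the pure form of A's dfs
def pvBest : List (Int × Int) → Int → Int → Int
  | [], _, _ => 0
  | (p, t) :: l, a, c =>
    max (if 0 < c ∧ PySem.Int.floordiv p 2 ≤ a then t + pvBest l (a - PySem.Int.floordiv p 2) (c - 1) else 0)
      (max (if p ≤ a then t + pvBest l (a - p) c else 0) (pvBest l a c))

def pvDecode (x : Int × Int) : Int × Int := (-x.2, x.1)

lemma pvHalf_nonneg {p : Int} (hp : 0 ≤ p) : 0 ≤ PySem.Int.floordiv p 2 := by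
  rw [PySem.Int.floordiv_eq_ediv_of_pos (by omega)]
  exact Int.ediv_nonneg hp (by omega)

lemma pvBest_nonneg (l : List (Int × Int)) (a c : Int) : 0 ≤ pvBest l a c := by
  induction l generalizing a c with
  | nil => simp [pvBest]
  | cons x l ih =>
    obtain ⟨p, t⟩ := x
    have h := ih a c
    simp only [pvBest]
    split_ifs <;> omega

lemma pvBest_neg_amount (l : List (Int × Int)) (hl : ∀ x ∈ l, 0 ≤ x.1) (a c : Int)
    (ha : a < 0) : pvBest l a c = 0 := by
  induction l with
  | nil => simp [pvBest]
  | cons x l ih =>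
    obtain ⟨p, t⟩ := x
    have hp : 0 ≤ p := hl (p, t) (by simp)
    have hh := pvHalf_nonneg hp
    have := ih (fun x hx => hl x (List.mem_cons_of_mem _ hx))
    simp only [pvBest]
    rw [if_neg (by omega), if_neg (by omega), this]
    simp

lemma pvStep_le_half {p t a c : Int} (l : List (Int × Int))
    (hg : 0 < c ∧ PySem.Int.floordiv p 2 ≤ a) :
    t + pvBest l (a - PySem.Int.floordiv p 2) (c - 1) ≤ pvBest ((p, t) :: l) a c := by
  simp only [pvBest]
  rw [if_pos hg]
  exact le_max_left _ _

lemma pvStep_le_full {p t a c : Int} (l : List (Int × Int)) (hg : p ≤ a) :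
    t + pvBest l (a - p) c ≤ pvBest ((p, t) :: l) a c := by
  simp only [pvBest]
  rw [if_pos hg]
  exact le_trans (le_max_left _ _) (le_max_right _ _)

lemma pvStep_le_skip {p t a c : Int} (l : List (Int × Int)) :
    pvBest l a c ≤ pvBest ((p, t) :: l) a c := by
  simp only [pvBest]
  exact le_trans (le_max_right _ _) (le_max_right _ _)

lemma pvBest_swap_le (p1 t1 p2 t2 : Int) (l : List (Int × Int)) (hp1 : 0 ≤ p1) (hp2 : 0 ≤ p2)
    (a c : Int) : pvBest ((p1, t1) :: (p2, t2) :: l) a c ≤ pvBest ((p2, t2) :: (p1, t1) :: l) a c := by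
  have hh1 := pvHalf_nonneg hp1
  have hh2 := pvHalf_nonneg hp2
  have hR0 := pvBest_nonneg ((p2, t2) :: (p1, t1) :: l) a c
  have hL : pvBest ((p1, t1) :: (p2, t2) :: l) a c =
      max (if 0 < c ∧ PySem.Int.floordiv p1 2 ≤ a then
            t1 + pvBest ((p2, t2) :: l) (a - PySem.Int.floordiv p1 2) (c - 1) else 0)
        (max (if p1 ≤ a then t1 + pvBest ((p2, t2) :: l) (a - p1) c else 0)
          (pvBest ((p2, t2) :: l) a c)) := by
    simp only [pvBest]
  rw [hL]
  clear hL
  apply max_le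
  · -- offers that take x1 with a coupon first
    split_ifs with g1
    · have hL2 : pvBest ((p2, t2) :: l) (a - PySem.Int.floordiv p1 2) (c - 1) =
          max (if 0 < c - 1 ∧ PySem.Int.floordiv p2 2 ≤ a - PySem.Int.floordiv p1 2 then
                t2 + pvBest l (a - PySem.Int.floordiv p1 2 - PySem.Int.floordiv p2 2) (c - 1 - 1) else 0)
            (max (if p2 ≤ a - PySem.Int.floordiv p1 2 then
                t2 + pvBest l (a - PySem.Int.floordiv p1 2 - p2) (c - 1) else 0)
              (pvBest l (a - PySem.Int.floordiv p1 2) (c - 1))) := by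
        simp only [pvBest]
      rw [hL2,
          show a - PySem.Int.floordiv p1 2 - PySem.Int.floordiv p2 2
            = a - PySem.Int.floordiv p2 2 - PySem.Int.floordiv p1 2 from by ring,
          show a - PySem.Int.floordiv p1 2 - p2 = a - p2 - PySem.Int.floordiv p1 2 from by ring]
      clear hL2
      have A3 := pvStep_le_half (p := p1) (t := t1) (a := a) (c := c) l g1
      have A4 := pvStep_le_skip (p := p2) (t := t2) (a := a) (c := c) ((p1, t1) :: l)
      have N1 := pvBest_nonneg l (a - PySem.Int.floordiv p1 2) (c - 1)
      split_ifs with g2 g3 g3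
      · have A1 := pvStep_le_half (p := p1) (t := t1) (a := a - PySem.Int.floordiv p2 2) (c := c - 1) l (by omega)
        have A2 := pvStep_le_half (p := p2) (t := t2) (a := a) (c := c) ((p1, t1) :: l) (by omega)
        have B1 := pvStep_le_half (p := p1) (t := t1) (a := a - p2) (c := c) l (by omega)
        have B2 := pvStep_le_full (p := p2) (t := t2) (a := a) (c := c) ((p1, t1) :: l) (by omega)
        omega
      · have A1 := pvStep_le_half (p := p1) (t := t1) (a := a - PySem.Int.floordiv p2 2) (c := c - 1) l (by omega)
        have A2 := pvStep_le_half (p := p2) (t := t2) (a := a) (c := c) ((p1, t1) :: l) (by omega)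
        omega
      · have B1 := pvStep_le_half (p := p1) (t := t1) (a := a - p2) (c := c) l (by omega)
        have B2 := pvStep_le_full (p := p2) (t := t2) (a := a) (c := c) ((p1, t1) :: l) (by omega)
        omega
      · omega
    · omega
  · apply max_le
    · -- offers that take x1 at full price first
      split_ifs with g1
      · have hL2 : pvBest ((p2, t2) :: l) (a - p1) c =
            max (if 0 < c ∧ PySem.Int.floordiv p2 2 ≤ a - p1 then
                  t2 + pvBest l (a - p1 - PySem.Int.floordiv p2 2) (c - 1) else 0)
              (max (if p2 ≤ a - p1 then t2 + pvBest l (a - p1 - p2) c else 0)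
                (pvBest l (a - p1) c)) := by
          simp only [pvBest]
        rw [hL2,
            show a - p1 - PySem.Int.floordiv p2 2 = a - PySem.Int.floordiv p2 2 - p1 from by ring,
            show a - p1 - p2 = a - p2 - p1 from by ring]
        clear hL2
        have A3 := pvStep_le_full (p := p1) (t := t1) (a := a) (c := c) l g1
        have A4 := pvStep_le_skip (p := p2) (t := t2) (a := a) (c := c) ((p1, t1) :: l)
        have N1 := pvBest_nonneg l (a - p1) c
        split_ifs with g2 g3 g3
        · have A1 := pvStep_le_full (p := p1) (t := t1) (a := a - PySem.Int.floordiv p2 2) (c := c - 1) l (by omega)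
          have A2 := pvStep_le_half (p := p2) (t := t2) (a := a) (c := c) ((p1, t1) :: l) (by omega)
          have B1 := pvStep_le_full (p := p1) (t := t1) (a := a - p2) (c := c) l (by omega)
          have B2 := pvStep_le_full (p := p2) (t := t2) (a := a) (c := c) ((p1, t1) :: l) (by omega)
          omega
        · have A1 := pvStep_le_full (p := p1) (t := t1) (a := a - PySem.Int.floordiv p2 2) (c := c - 1) l (by omega)
          have A2 := pvStep_le_half (p := p2) (t := t2) (a := a) (c := c) ((p1, t1) :: l) (by omega)
          omega
        · have B1 := pvStep_le_full (p := p1) (t := t1) (a := a - p2) (c := c) l (by omega)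
          have B2 := pvStep_le_full (p := p2) (t := t2) (a := a) (c := c) ((p1, t1) :: l) (by omega)
          omega
        · omega
      · omega
    · -- offers that skip x1
      have hL2 : pvBest ((p2, t2) :: l) a c =
          max (if 0 < c ∧ PySem.Int.floordiv p2 2 ≤ a then
                t2 + pvBest l (a - PySem.Int.floordiv p2 2) (c - 1) else 0)
            (max (if p2 ≤ a then t2 + pvBest l (a - p2) c else 0) (pvBest l a c)) := by
        simp only [pvBest]
      rw [hL2]
      clear hL2
      have A3 := pvStep_le_skip (p := p1) (t := t1) (a := a) (c := c) l
      have A4 := pvStep_le_skip (p := p2) (t := t2) (a := a) (c := c) ((p1, t1) :: l)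
      have N1 := pvBest_nonneg l a c
      split_ifs with g2 g3 g3
      · have A1 := pvStep_le_skip (p := p1) (t := t1) (a := a - PySem.Int.floordiv p2 2) (c := c - 1) l
        have A2 := pvStep_le_half (p := p2) (t := t2) (a := a) (c := c) ((p1, t1) :: l) g2
        have B1 := pvStep_le_skip (p := p1) (t := t1) (a := a - p2) (c := c) l
        have B2 := pvStep_le_full (p := p2) (t := t2) (a := a) (c := c) ((p1, t1) :: l) g3
        omega
      · have A1 := pvStep_le_skip (p := p1) (t := t1) (a := a - PySem.Int.floordiv p2 2) (c := c - 1) l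
        have A2 := pvStep_le_half (p := p2) (t := t2) (a := a) (c := c) ((p1, t1) :: l) g2
        omega
      · have B1 := pvStep_le_skip (p := p1) (t := t1) (a := a - p2) (c := c) l
        have B2 := pvStep_le_full (p := p2) (t := t2) (a := a) (c := c) ((p1, t1) :: l) g3
        omega
      · omega

lemma pvBest_swap (p1 t1 p2 t2 : Int) (l : List (Int × Int)) (hp1 : 0 ≤ p1) (hp2 : 0 ≤ p2)
    (a c : Int) : pvBest ((p1, t1) :: (p2, t2) :: l) a c = pvBest ((p2, t2) :: (p1, t1) :: l) a c :=
  le_antisymm (pvBest_swap_le p1 t1 p2 t2 l hp1 hp2 a c)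
    (pvBest_swap_le p2 t2 p1 t1 l hp2 hp1 a c)

lemma pvBest_perm {l1 l2 : List (Int × Int)} (h : l1.Perm l2) (hl : ∀ x ∈ l1, 0 ≤ x.1)
    (a c : Int) : pvBest l1 a c = pvBest l2 a c := by
  induction h generalizing a c with
  | nil => rfl
  | cons x _ ih =>
    obtain ⟨p, t⟩ := x
    simp only [pvBest, ih (fun y hy => hl y (List.mem_cons_of_mem _ hy))]
  | swap x y l =>
    obtain ⟨p1, t1⟩ := y
    obtain ⟨p2, t2⟩ := x
    exact pvBest_swap p1 t1 p2 t2 l (hl (p1, t1) (by simp)) (hl (p2, t2) (by simp)) a c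
  | trans h12 h23 ih1 ih2 =>
    rw [ih1 hl, ih2 (fun x hx => hl x (h12.mem_iff.mpr hx))]

-- ---- A side: the memoized dfs computes pvBest ----

def pvInv (full : List (Int × Int)) (dp : PySem.Dict (Int × Int × Int) Int) : Prop :=
  ∀ j a c, 0 ≤ j → dp.getD (j, a, c) (-1) ≠ -1 →
    dp.getD (j, a, c) (-1) = pvBest ((full.drop j.toNat).map pvDecode) a c

lemma pvInv_insert (full : List (Int × Int)) (d : PySem.Dict (Int × Int × Int) Int)
    (j : Nat) (a c v : Int) (hinv : pvInv full d)
    (hv : v = pvBest ((full.drop j).map pvDecode) a c) :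
    pvInv full (d.insert ((j : Int), a, c) v) := by
  intro j' a' c' hj' hne
  rw [PySem.Dict.getD_insert] at hne ⊢
  by_cases he : (j', a', c') = ((j : Int), a, c)
  · rw [if_pos he] at hne ⊢
    obtain ⟨h1, h2, h3⟩ : j' = (j : Int) ∧ a' = a ∧ c' = c := by
      simpa [Prod.ext_iff] using he
    subst h1; subst h2; subst h3
    simpa [Int.toNat_natCast] using hv
  · rw [if_neg he] at hne ⊢
    exact hinv j' a' c' hj' hne

lemma pvDfsA_correct (full : List (Int × Int)) (hfull : ∀ x ∈ full, 0 ≤ -x.2) :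
    ∀ (rest : List (Int × Int)) (j : Nat) (a c : Int) dp, rest = full.drop j → pvInv full dp →
      (pvDfsA rest (j : Int) a c dp).1 = pvBest (rest.map pvDecode) a c ∧
        pvInv full (pvDfsA rest (j : Int) a c dp).2 := by
  intro rest
  induction rest with
  | nil => intro j a c dp _ hinv; simpa [pvDfsA, pvBest] using hinv
  | cons x rest' ih =>
    intro j a c dp hdrop hinv
    obtain ⟨t, negp⟩ := x
    have hrest' : rest' = full.drop (j + 1) := by
      have h1 : full.drop (j+1) = (full.drop j).drop 1 := by rw [List.drop_drop]
      rw [h1, ← hdrop]; rfl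
    have hrestnn : ∀ y ∈ ((t, negp) :: rest').map pvDecode, 0 ≤ y.1 := by
      intro y hy
      simp only [List.mem_map] at hy
      obtain ⟨z, hz, rfl⟩ := hy
      have : z ∈ full := by rw [hdrop] at hz; exact List.mem_of_mem_drop hz
      exact hfull _ this
    by_cases hneg : a < 0
    · constructor
      · simp only [pvDfsA, if_pos hneg]
        exact (pvBest_neg_amount _ hrestnn a c hneg).symm
      · simpa only [pvDfsA, if_pos hneg] using hinv
    · by_cases hc : dp.getD ((j : Int), a, c) (-1) ≠ -1
      · constructor
        · simp only [pvDfsA, if_neg hneg, if_pos hc]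
          have := hinv (j : Int) a c (by positivity) hc
          simpa [hdrop, Int.toNat_natCast] using this
        · simpa only [pvDfsA, if_neg hneg, if_pos hc] using hinv
      · have hcast : ((j : Int) + 1) = ((j + 1 : Nat) : Int) := by push_cast; ring
        by_cases g1 : 0 < c ∧ PySem.Int.floordiv (-negp) 2 ≤ a
        · have c1 := ih (j + 1) (a - PySem.Int.floordiv (-negp) 2) (c - 1) dp hrest' hinv
          by_cases g2 : -negp ≤ a
          · have c2 := ih (j + 1) (a - -negp) c _ hrest' c1.2
            have c3 := ih (j + 1) a c _ hrest' c2.2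
            constructor
            · simp only [pvDfsA, if_neg hneg, if_neg hc, if_pos g1, if_pos g2, hcast,
                List.map_cons, pvBest, pvDecode, c1.1, c2.1, c3.1]
            · simp only [pvDfsA, if_neg hneg, if_neg hc, if_pos g1, if_pos g2, hcast]
              apply pvInv_insert full _ j a c _ c3.2
              simp only [← hdrop, List.map_cons, pvBest, pvDecode, if_pos g1, if_pos g2,
                c1.1, c2.1, c3.1]
          · have c3 := ih (j + 1) a c _ hrest' c1.2
            constructor
            · simp only [pvDfsA, if_neg hneg, if_neg hc, if_pos g1, if_neg g2, hcast,
                List.map_cons, pvBest, pvDecode, c1.1, c3.1]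
            · simp only [pvDfsA, if_neg hneg, if_neg hc, if_pos g1, if_neg g2, hcast]
              apply pvInv_insert full _ j a c _ c3.2
              simp only [← hdrop, List.map_cons, pvBest, pvDecode, if_pos g1, if_neg g2,
                c1.1, c3.1]
        · by_cases g2 : -negp ≤ a
          · have c2 := ih (j + 1) (a - -negp) c dp hrest' hinv
            have c3 := ih (j + 1) a c _ hrest' c2.2
            constructor
            · simp only [pvDfsA, if_neg hneg, if_neg hc, if_neg g1, if_pos g2, hcast,
                List.map_cons, pvBest, pvDecode, c2.1, c3.1]
            · simp only [pvDfsA, if_neg hneg, if_neg hc, if_neg g1, if_pos g2, hcast]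
              apply pvInv_insert full _ j a c _ c3.2
              simp only [← hdrop, List.map_cons, pvBest, pvDecode, if_neg g1, if_pos g2,
                c2.1, c3.1]
          · have c3 := ih (j + 1) a c dp hrest' hinv
            constructor
            · simp only [pvDfsA, if_neg hneg, if_neg hc, if_neg g1, if_neg g2, hcast,
                List.map_cons, pvBest, pvDecode, c3.1]
            · simp only [pvDfsA, if_neg hneg, if_neg hc, if_neg g1, if_neg g2, hcast]
              apply pvInv_insert full _ j a c _ c3.2
              simp only [← hdrop, List.map_cons, pvBest, pvDecode, if_neg g1, if_neg g2,
                c3.1]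

-- ---- B side: the layered grid computes pvBest ----

def pvInv2 (W C : Int) (T : List (List Int)) (m : List (Int × Int)) : Prop :=
  ∀ a c, 0 ≤ a → a ≤ W → 0 ≤ c → c ≤ C → pvCell T a c = pvBest m a c

lemma pvCell_map (W _C : Int) (f : Int → List Int) (a c : Int)
    (ha0 : 0 ≤ a) (haW : a < W + 1) :
    pvCell ((PySem.List.pyRange 0 (W + 1) 1).map f) a c = PySem.List.pyGetD (f a) c 0 := by
  unfold pvCell
  rw [PySem.List.pyGetD_map_pyRange_of_nonneg f (W + 1) a [] ha0 haW]

lemma pvStepB_pres {W C : Int} {T : List (List Int)} {m : List (Int × Int)} {pt : Int × Int}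
    (hp : 0 ≤ pt.1) (hT : pvInv2 W C T m) : pvInv2 W C (pvStepB W C T pt) (pt :: m) := by
  obtain ⟨p, t⟩ := pt
  simp only at hp
  have hh := pvHalf_nonneg hp
  intro a c ha0 haW hc0 hcC
  rw [pvStepB]
  simp only []
  rw [pvCell_map W C _ a c ha0 (by omega),
    PySem.List.pyGetD_map_pyRange_of_nonneg _ (C + 1) c 0 hc0 (by omega)]
  have B0 := hT a c ha0 haW hc0 hcC
  have nn := pvBest_nonneg m
  simp only [pvBest]
  by_cases g2 : p ≤ a
  · rw [if_pos g2, if_pos g2, hT (a - p) c (by omega) (by omega) hc0 hcC]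
    by_cases g1 : 0 < c ∧ PySem.Int.floordiv p 2 ≤ a
    · rw [if_pos (show (1:Int) ≤ c ∧ PySem.Int.floordiv p 2 ≤ a by omega), if_pos g1,
        hT (a - PySem.Int.floordiv p 2) (c - 1) (by omega) (by omega) (by omega) (by omega), B0]
      have := nn a c
      omega
    · rw [if_neg (by omega), if_neg g1, B0]
      have := nn a c
      omega
  · rw [if_neg g2, if_neg g2]
    by_cases g1 : 0 < c ∧ PySem.Int.floordiv p 2 ≤ a
    · rw [if_pos (show (1:Int) ≤ c ∧ PySem.Int.floordiv p 2 ≤ a by omega), if_pos g1,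
        hT (a - PySem.Int.floordiv p 2) (c - 1) (by omega) (by omega) (by omega) (by omega), B0]
      have := nn a c
      omega
    · rw [if_neg (by omega), if_neg g1, B0]
      have := nn a c
      omega

lemma pvFoldB {W C : Int} : ∀ (l : List (Int × Int)) (m : List (Int × Int)) (T : List (List Int)),
    (∀ x ∈ l, 0 ≤ x.1) → pvInv2 W C T m →
    pvInv2 W C (l.foldl (pvStepB W C) T) (l.reverse ++ m) := by
  intro l
  induction l with
  | nil => intro m T _ h; simpa using h
  | cons x l ih =>
    intro m T hl hT
    have h1 := pvStepB_pres (hl x (by simp)) hT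
    have h2 := ih (x :: m) _ (fun y hy => hl y (List.mem_cons_of_mem _ hy)) h1
    simpa using h2

lemma pvDfsA_neg (rest : List (Int × Int)) (idx a c : Int)
    (dp : PySem.Dict (Int × Int × Int) Int) (ha : a < 0) : (pvDfsA rest idx a c dp).1 = 0 := by
  cases rest with
  | nil => rfl
  | cons x rest' => obtain ⟨t, negp⟩ := x; simp [pvDfsA, if_pos ha]

lemma pvIndexed_eq_zip (xs ys : List Int) (hlen : xs.length ≤ ys.length) :
    (PySem.List.pyRange 0 (xs.length : Int) 1).map
      (fun i => (PySem.List.pyGetD xs i 0, PySem.List.pyGetD ys i 0)) = xs.zip ys := by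
  rw [PySem.List.pyRange_one]
  simp only [sub_zero, Int.toNat_natCast, List.map_map]
  apply List.ext_getElem
  · simp [Nat.min_eq_left hlen]
  · intro i h1 h2
    have hix : i < xs.length := by simpa using h1
    have hiy : i < ys.length := Nat.lt_of_lt_of_le hix hlen
    simp [hix, hiy]

-- ===== VERDICT (by name: the statement is the Claim_ definition above) =====
theorem maxTastiness_spec : Claim_equal_maxTastiness := by
  intro price tastiness W C _ hpre
  obtain ⟨hlen, hcase⟩ := hpre
  unfold Spec_maxTastiness
  by_cases hW : W < 0
  · simp only [maxTastiness, maxTastiness_alt, if_pos hW]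
    exact pvDfsA_neg _ _ _ _ _ hW
  · have hprices : ∀ p ∈ price, 0 ≤ p := ((hcase.resolve_left hW).1)
    have hC : 0 ≤ C := (hcase.resolve_left hW).2
    simp only [maxTastiness, maxTastiness_alt, if_neg hW]
    set n : Int := (price.length : Int) with hn
    set f : Int → Int × Int :=
      fun i => (PySem.List.pyGetD tastiness i 0, -(PySem.List.pyGetD price i 0)) with hf
    set candis := (PySem.List.pyRange 0 n 1).map f with hcand
    set sc := PySem.List.sorted2 candis (fun x => x.1) (fun x => x.2) true with hsc
    have hcannn : ∀ x ∈ candis, 0 ≤ -x.2 := by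
      intro x hx
      rw [hcand] at hx
      simp only [List.mem_map] at hx
      obtain ⟨i, hi, rfl⟩ := hx
      rw [PySem.List.mem_pyRange_one] at hi
      have hilt : i < (price.length : Int) := hi.2
      rw [hf]
      simp only [neg_neg]
      have := PySem.List.pyGetD_eq_getElem (xs := price) (i := i) (d := 0) hi.1 (by simpa using hilt)
      rw [this]
      exact hprices _ (List.getElem_mem _)
    have hscnn : ∀ x ∈ sc, 0 ≤ -x.2 := by
      intro x hx
      exact hcannn x ((PySem.List.sorted2_perm candis (fun x => x.1) (fun x => x.2) true).mem_iff.mp hx)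
    -- A computes pvBest over the sorted, decoded items
    have hA := (pvDfsA_correct sc hscnn sc 0 W C PySem.Dict.empty (by simp)
      (by intro j a c _ hne; simp [PySem.Dict.getD_empty] at hne)).1
    rw [Nat.cast_zero] at hA
    rw [hA]
    -- decoded candis are exactly zip price tastiness
    have hdec : candis.map pvDecode = price.zip tastiness := by
      rw [hcand, List.map_map]
      have : (pvDecode ∘ f) = fun i => (PySem.List.pyGetD price i 0, PySem.List.pyGetD tastiness i 0) := by
        funext i
        simp [pvDecode, hf]
      rw [this, hn]
      exact pvIndexed_eq_zip price tastiness hlen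
    have hzipnn : ∀ x ∈ price.zip tastiness, 0 ≤ x.1 := by
      intro x hx
      obtain ⟨p, t⟩ := x
      exact hprices p (List.of_mem_zip hx).1
    -- B computes pvBest over the reversed zip
    have hB0 : pvInv2 W C ((PySem.List.pyRange 0 (W + 1) 1).map (fun _ =>
        (PySem.List.pyRange 0 (C + 1) 1).map (fun _ => (0 : Int)))) [] := by
      intro a c ha0 haW hc0 hcC
      rw [pvCell_map W C _ a c ha0 (by omega),
        PySem.List.pyGetD_map_pyRange_of_nonneg _ (C + 1) c 0 hc0 (by omega)]
      rfl
    have hB := pvFoldB (W := W) (C := C) (price.zip tastiness) [] _ hzipnn hB0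
    rw [List.append_nil] at hB
    rw [hB W C (by omega) le_rfl hC le_rfl]
    -- both sides are pvBest of permutations of the same list
    have h1 : pvBest (sc.map pvDecode) W C = pvBest (price.zip tastiness) W C := by
      apply pvBest_perm (l2 := price.zip tastiness)
      · rw [← hdec]
        exact (PySem.List.sorted2_perm candis (fun x => x.1) (fun x => x.2) true).map pvDecode
      · intro x hx
        simp only [List.mem_map] at hx
        obtain ⟨z, hz, rfl⟩ := hx
        exact hscnn z hz
    have h2 : pvBest ((price.zip tastiness).reverse) W C = pvBest (price.zip tastiness) W C :=
      pvBest_perm (List.reverse_perm _) (fun x hx => hzipnn x (List.mem_reverse.mp hx)) W C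
    rw [h1, h2]
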